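-- pv_equiv track=rewrite | github.com/Zahid-Pathan/Agentic_AI_for_tabular_document_extraction | src/ocr_agent.py | _extract_column_headers_enhanced
-- ===== SOURCE A (Python) =====
-- def _extract_column_headers_enhanced(cleaned_table, header_rows):
--     """Extract hierarchical column headers"""
--     column_headers = {}
--     if not cleaned_table or not header_rows:
--         return column_headers
--
--     num_cols = max((len(row) for row in cleaned_table), default=0)
--
--     for col_idx in range(num_cols):
--         headers = []
--         for header_row_idx in sorted(header_rows):
--             if header_row_idx < len(cleaned_table):
--                 row = cleaned_table[header_row_idx]
--                 if col_idx < len(row) and row[col_idx]: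
--                     header_text = str(row[col_idx]).strip()
--                     if header_text and header_text not in headers:
--                         headers.append(header_text)
--
--         if headers:
--             column_headers[col_idx] = headers
--
--     return column_headers
-- ===== SOURCE B (Python) =====
-- def _extract_column_headers_enhanced(cleaned_table, header_rows):
--     """Extract hierarchical column headers (row-major single pass)."""
--     if not cleaned_table or not header_rows:
--         return {}
--     num_cols = max((len(row) for row in cleaned_table), default=0)
--     if num_cols == 0:
--         return {}
--     acc = [[] for _ in range(num_cols)]
--     for h in sorted(header_rows):
--         if h < len(cleaned_table):
--             for c, cell in enumerate(cleaned_table[h]):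
--                 if cell:
--                     t = cell.strip()
--                     if t and t not in acc[c]:
--                         acc[c].append(t)
--     return {c: acc[c] for c in range(num_cols) if acc[c]}
-- ===== Notes on version B (the rewrite author's own statement) =====
-- stated objective: alternative
-- what changed: B transposes the traversal: it sorts header_rows once, makes a single row-major pass over the valid header rows accumulating stripped distinct cell texts into a per-column list-of-lists accumulator, then assembles the result dict in ascending column order keeping only non-empty columns, instead of A's per-column loop that re-sorts header_rows and re-scans the rows for every column.
import Mathlib
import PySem

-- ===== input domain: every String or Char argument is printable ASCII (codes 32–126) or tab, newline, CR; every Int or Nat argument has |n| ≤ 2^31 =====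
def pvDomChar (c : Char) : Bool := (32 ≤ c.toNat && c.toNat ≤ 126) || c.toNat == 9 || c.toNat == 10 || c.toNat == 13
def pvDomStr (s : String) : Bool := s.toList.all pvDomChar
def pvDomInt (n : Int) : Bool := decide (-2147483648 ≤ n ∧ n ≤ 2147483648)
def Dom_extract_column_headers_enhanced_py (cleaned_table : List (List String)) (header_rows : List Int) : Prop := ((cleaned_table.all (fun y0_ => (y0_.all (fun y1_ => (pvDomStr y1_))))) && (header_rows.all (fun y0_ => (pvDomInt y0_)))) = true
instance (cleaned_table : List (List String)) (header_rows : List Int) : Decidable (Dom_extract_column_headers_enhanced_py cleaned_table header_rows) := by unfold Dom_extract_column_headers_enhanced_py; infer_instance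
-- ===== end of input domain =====

-- B hoists the sort out of the column loop and makes one row-major pass into a per-column
-- accumulator, then assembles the dict in column order (objective: alternative decomposition).

-- ===== PORT A =====
-- A: per-column loop; inner loop over sorted(header_rows) collecting distinct stripped texts.
-- cleaned_table[header_row_idx] may use Python negative-index wraparound; pyGet? none (IndexError) is
-- excluded by Pre_, the .getD [] there is never reached on Pre_ inputs.
def extract_column_headers_enhanced_py (cleaned_table : List (List String)) (header_rows : List Int) : List (Int × List String) :=
  if cleaned_table = [] ∨ header_rows = [] then []
  else
    let num_cols : Int := PySem.List.maxD (cleaned_table.map (fun row => (row.length : Int))) (fun x => x) 0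
    (PySem.List.pyRange 0 num_cols 1).foldl (fun column_headers col_idx =>
      let headers : List String :=
        (PySem.List.sorted header_rows (fun x => x) false).foldl (fun headers header_row_idx =>
          if header_row_idx < (cleaned_table.length : Int) then
            let row := (PySem.List.pyGet? cleaned_table header_row_idx).getD []
            if col_idx < (row.length : Int) ∧ (PySem.List.pyGet? row col_idx).getD "" ≠ "" then
              let header_text := PySem.Str.strip ((PySem.List.pyGet? row col_idx).getD "")
              if header_text ≠ "" ∧ header_text ∉ headers then headers ++ [header_text] else headers
            else headers
          else headers) []
      if headers ≠ [] then column_headers ++ [(col_idx, headers)] else column_headers) []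

-- ===== PORT B =====
-- 'if cell: t = cell.strip(); if t and t not in acc[c]: acc[c].append(t)' — one cell's update of the accumulator
def pvStep (acc : List (List String)) (c : Nat) (cell : String) : List (List String) :=
  if cell ≠ "" then
    let t := PySem.Str.strip cell
    let cur := acc.getD c []
    if t ≠ "" ∧ t ∉ cur then acc.set c (cur ++ [t]) else acc
  else acc

-- 'for c, cell in enumerate(cleaned_table[h]): …' — structural recursion over the row carrying the index c
def pvRowPass : List (List String) → Nat → List String → List (List String)
  | acc, _, [] => acc
  | acc, c, cell :: rest => pvRowPass (pvStep acc c cell) (c + 1) rest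

def extract_column_headers_enhanced_py_alt (cleaned_table : List (List String)) (header_rows : List Int) : List (Int × List String) :=
  if cleaned_table = [] ∨ header_rows = [] then []
  else
    let num_cols : Int := PySem.List.maxD (cleaned_table.map (fun row => (row.length : Int))) (fun x => x) 0
    if num_cols = 0 then []
    else
      let acc0 : List (List String) := (PySem.List.pyRange 0 num_cols 1).map (fun _ => [])
      let acc := (PySem.List.sorted header_rows (fun x => x) false).foldl (fun acc h =>
          if h < (cleaned_table.length : Int) then
            pvRowPass acc 0 ((PySem.List.pyGet? cleaned_table h).getD [])
          else acc) acc0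
      (PySem.List.pyRange 0 num_cols 1).foldl (fun out c =>
          let headers := acc.getD c.toNat []
          if headers ≠ [] then out ++ [(c, headers)] else out) []

-- ===== PRECONDITION & SPEC =====
-- Pre_ is exactly where the Python A returns: it excludes only inputs where A raises IndexError,
-- i.e. a nonempty table with some non-empty row, nonempty header_rows, and some index below -len(cleaned_table).
def Pre_extract_column_headers_enhanced_py (cleaned_table : List (List String)) (header_rows : List Int) : Prop :=
  cleaned_table = [] ∨ header_rows = [] ∨ (∀ row ∈ cleaned_table, row = []) ∨
    (∀ h ∈ header_rows, -(cleaned_table.length : Int) ≤ h)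
instance (cleaned_table : List (List String)) (header_rows : List Int) : Decidable (Pre_extract_column_headers_enhanced_py cleaned_table header_rows) := by unfold Pre_extract_column_headers_enhanced_py; infer_instance

def pvWitness_extract_column_headers_enhanced_py : List (List String) × List Int :=
  ([[" Name ", "Qty"], ["Name", ""]], [0, 1])

def Spec_extract_column_headers_enhanced_py (cleaned_table : List (List String)) (header_rows : List Int) (out : List (Int × List String)) : Prop := out = extract_column_headers_enhanced_py_alt cleaned_table header_rows
instance (cleaned_table : List (List String)) (header_rows : List Int) (out : List (Int × List String)) : Decidable (Spec_extract_column_headers_enhanced_py cleaned_table header_rows out) := by unfold Spec_extract_column_headers_enhanced_py; infer_instance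

-- ===== CLAIM =====
def Claim_equal_extract_column_headers_enhanced_py : Prop := ∀ (cleaned_table : List (List String)) (header_rows : List Int), Dom_extract_column_headers_enhanced_py cleaned_table header_rows → Pre_extract_column_headers_enhanced_py cleaned_table header_rows → Spec_extract_column_headers_enhanced_py cleaned_table header_rows (extract_column_headers_enhanced_py cleaned_table header_rows)

-- ===== LEMMAS AND PROOFS =====

-- the effect of one cell on one column's header list
def pvCell (cell : String) (headers : List String) : List String :=
  if cell ≠ "" then
    let t := PySem.Str.strip cell
    if t ≠ "" ∧ t ∉ headers then headers ++ [t] else headers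
  else headers

theorem pvStep_length (acc : List (List String)) (c : Nat) (cell : String) :
    (pvStep acc c cell).length = acc.length := by
  unfold pvStep; dsimp only; split_ifs <;> simp

theorem pvStep_getD_ne (acc : List (List String)) (c n : Nat) (cell : String) (hne : c ≠ n) :
    (pvStep acc c cell).getD n [] = acc.getD n [] := by
  unfold pvStep; dsimp only
  split_ifs <;> simp [List.getD, List.getElem?_set_ne hne]

theorem pvStep_getD_self (acc : List (List String)) (c : Nat) (cell : String)
    (hc : c < acc.length) :
    (pvStep acc c cell).getD c [] = pvCell cell (acc.getD c []) := by
  unfold pvStep pvCell; dsimp only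
  split_ifs <;> simp [List.getD, List.getElem?_set_self hc]

theorem pvRowPass_length (row : List String) : ∀ (acc : List (List String)) (c : Nat),
    (pvRowPass acc c row).length = acc.length := by
  induction row with
  | nil => intro acc c; rfl
  | cons cell rest ih =>
    intro acc c
    simp only [pvRowPass, ih, pvStep_length]

theorem pvRowPass_getD (row : List String) : ∀ (acc : List (List String)) (c0 n : Nat),
    n < acc.length →
    (pvRowPass acc c0 row).getD n [] =
      if c0 ≤ n ∧ n < c0 + row.length then pvCell (row.getD (n - c0) "") (acc.getD n [])
      else acc.getD n [] := by
  induction row with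
  | nil =>
    intro acc c0 n _
    simp only [pvRowPass, List.length_nil]
    rw [if_neg (by omega)]
  | cons cell rest ih =>
    intro acc c0 n hn
    simp only [pvRowPass]
    rw [ih (pvStep acc c0 cell) (c0 + 1) n (by rw [pvStep_length]; exact hn)]
    by_cases hc : n = c0
    · subst hc
      rw [if_neg (by omega), if_pos (by simp only [List.length_cons]; omega), pvStep_getD_self acc n cell hn]
      simp [List.getD]
    · rw [pvStep_getD_ne acc c0 n cell (by omega)]
      by_cases hlt : c0 + 1 ≤ n ∧ n < c0 + 1 + rest.length
      · rw [if_pos hlt, if_pos (by simp only [List.length_cons]; omega)]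
        have h1 : n - c0 = (n - (c0 + 1)) + 1 := by omega
        rw [h1]
        rfl
      · rw [if_neg hlt, if_neg (by simp only [List.length_cons]; omega)]

-- pvCell absorbs the out-of-row case: getD returns "" past the end and pvCell "" is the identity
theorem pvRowPass_getD_zero (row : List String) (acc : List (List String)) (n : Nat)
    (hn : n < acc.length) :
    (pvRowPass acc 0 row).getD n [] = pvCell (row.getD n "") (acc.getD n []) := by
  rw [pvRowPass_getD row acc 0 n hn]
  by_cases h : n < row.length
  · rw [if_pos (by omega)]
    simp
  · rw [if_neg (by omega)]
    have h1 : row.getD n "" = "" := by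
      simp [List.getD, List.getElem?_eq_none (by omega : row.length ≤ n)]
    rw [h1]
    simp [pvCell]

-- outer pass, pointwise: column n of the accumulator equals a per-column fold
theorem pvOuter_getD (ct : List (List String)) (rows : List Int) :
    ∀ (acc : List (List String)) (n : Nat), n < acc.length →
    (rows.foldl (fun acc h =>
        if h < (ct.length : Int) then pvRowPass acc 0 ((PySem.List.pyGet? ct h).getD []) else acc) acc).getD n [] =
    rows.foldl (fun headers h =>
        if h < (ct.length : Int) then pvCell (((PySem.List.pyGet? ct h).getD []).getD n "") headers
        else headers) (acc.getD n []) := by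
  induction rows with
  | nil => intro acc n _; rfl
  | cons r rest ih =>
    intro acc n hn
    simp only [List.foldl_cons]
    by_cases hr : r < (ct.length : Int)
    · rw [if_pos hr, if_pos hr,
        ih _ _ (by rw [pvRowPass_length]; exact hn),
        pvRowPass_getD_zero _ _ _ hn]
    · rw [if_neg hr, if_neg hr, ih _ _ hn]

-- A's inner body at a nonnegative column index is the pvCell step
theorem pvColBody_eq (ct : List (List String)) (col_idx : Int) (h0 : 0 ≤ col_idx)
    (headers : List String) (h : Int) :
    (if h < (ct.length : Int) then
      (let row := (PySem.List.pyGet? ct h).getD []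
       if col_idx < (row.length : Int) ∧ (PySem.List.pyGet? row col_idx).getD "" ≠ "" then
         let header_text := PySem.Str.strip ((PySem.List.pyGet? row col_idx).getD "")
         if header_text ≠ "" ∧ header_text ∉ headers then headers ++ [header_text] else headers
       else headers)
    else headers) =
    (if h < (ct.length : Int) then
      pvCell (((PySem.List.pyGet? ct h).getD []).getD col_idx.toNat "") headers
    else headers) := by
  by_cases hh : h < (ct.length : Int)
  · rw [if_pos hh, if_pos hh]
    set row := (PySem.List.pyGet? ct h).getD [] with hrow
    have hget : (PySem.List.pyGet? row col_idx).getD "" = row.getD col_idx.toNat "" := by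
      have h1 : col_idx = ((col_idx.toNat : Nat) : Int) := by omega
      rw [h1, PySem.List.pyGet?_natCast]
      rfl
    dsimp only
    rw [hget]
    set v := row.getD col_idx.toNat "" with hv
    by_cases hcv : v = ""
    · rw [if_neg (by tauto)]
      unfold pvCell
      rw [if_neg (by tauto)]
    · by_cases hin : col_idx < (row.length : Int)
      · rw [if_pos ⟨hin, hcv⟩]
        unfold pvCell
        rw [if_pos hcv]
      · exfalso
        apply hcv
        rw [hv]
        simp [List.getD, List.getElem?_eq_none (by omega : row.length ≤ col_idx.toNat)]
  · rw [if_neg hh, if_neg hh]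

-- the fresh accumulator has [] in every column
theorem pvAcc0_getD (n : Int) (m : Nat) :
    (((PySem.List.pyRange 0 n 1).map (fun _ => ([] : List String))).getD m []) = [] := by
  simp only [List.getD, List.getElem?_map]
  cases (PySem.List.pyRange 0 n 1)[m]? <;> rfl

-- ===== VERDICT =====
theorem extract_column_headers_enhanced_py_spec : Claim_equal_extract_column_headers_enhanced_py := by
  intro cleaned_table header_rows _ _
  unfold Spec_extract_column_headers_enhanced_py
  unfold extract_column_headers_enhanced_py extract_column_headers_enhanced_py_alt
  by_cases h0 : cleaned_table = [] ∨ header_rows = []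
  · rw [if_pos h0, if_pos h0]
  · rw [if_neg h0, if_neg h0]
    dsimp only
    set num_cols := PySem.List.maxD (cleaned_table.map fun row => (row.length : Int)) (fun x => x) 0 with hnc
    by_cases hz : num_cols = 0
    · rw [if_pos hz, hz, PySem.List.pyRange_one_eq_nil (le_refl 0)]
      rfl
    · rw [if_neg hz]
      apply PySem.List.foldl_congr_mem
      intro out c hc
      obtain ⟨hc0, hclt⟩ := PySem.List.mem_pyRange_one.mp hc
      have hlt : c.toNat <
          ((PySem.List.pyRange 0 num_cols 1).map (fun _ => ([] : List String))).length := by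
        simp only [List.length_map, PySem.List.length_pyRange_one]
        omega
      have hacc :
          ((PySem.List.sorted header_rows (fun x => x) false).foldl (fun acc h =>
              if h < (cleaned_table.length : Int) then
                pvRowPass acc 0 ((PySem.List.pyGet? cleaned_table h).getD [])
              else acc)
            ((PySem.List.pyRange 0 num_cols 1).map (fun _ => ([] : List String)))).getD c.toNat [] =
          (PySem.List.sorted header_rows (fun x => x) false).foldl (fun headers h =>
              if h < (cleaned_table.length : Int) then
                pvCell (((PySem.List.pyGet? cleaned_table h).getD []).getD c.toNat "") headers
              else headers) [] := by
        rw [pvOuter_getD cleaned_table _ _ _ hlt, pvAcc0_getD]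
      rw [hacc]
      have hcol :
          (PySem.List.sorted header_rows (fun x => x) false).foldl (fun headers header_row_idx =>
              if header_row_idx < (cleaned_table.length : Int) then
                (let row := (PySem.List.pyGet? cleaned_table header_row_idx).getD []
                 if c < (row.length : Int) ∧ (PySem.List.pyGet? row c).getD "" ≠ "" then
                   let header_text := PySem.Str.strip ((PySem.List.pyGet? row c).getD "")
                   if header_text ≠ "" ∧ header_text ∉ headers then headers ++ [header_text]
                   else headers
                 else headers)
              else headers) [] =
          (PySem.List.sorted header_rows (fun x => x) false).foldl (fun headers h =>
              if h < (cleaned_table.length : Int) then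
                pvCell (((PySem.List.pyGet? cleaned_table h).getD []).getD c.toNat "") headers
              else headers) [] := by
        apply PySem.List.foldl_congr_mem
        intro headers h _
        exact pvColBody_eq cleaned_table c hc0 headers h
      rw [hcol]
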